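-- pv_equiv track=rewrite | github.com/pypi-data/pypi-mirror-8 | packages/paqmind.flask-views/paqmind.flask-views-0.3.0.tar.gz/paqmind.flask-views-0.3.0/flask_views/modelview.py | dashify
-- ===== SOURCE A (Python) =====
-- import string
--
-- def dashify(text):
--     result = text[0].lower()
--     for c in text[1:]:
--         if c in string.ascii_lowercase:
--             result = result + c
--         else:
--             result = result + '-' + c.lower()
--     return result
-- ===== SOURCE B (Python) =====
-- import re
--
-- def dashify(text):
--     # idiomatic: one regex substitution over the tail instead of a char-by-char accumulator loop
--     return text[0].lower() + re.sub(r'[^a-z]', lambda m: '-' + m.group(0).lower(), text[1:])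
-- ===== Notes on version B (the rewrite author's own statement) =====
-- stated objective: idiomatic
-- what changed: Replaces the explicit accumulator loop with membership test against string.ascii_lowercase by a single regex substitution ('[^a-z]' -> '-' + lowercase) over the tail, concatenated after the lowered first character; the scan runs in the C regex engine and avoids quadratic string concatenation.
-- outside the precondition, e.g. on dashify(''): A raises IndexError, B raises IndexError
import Mathlib
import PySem

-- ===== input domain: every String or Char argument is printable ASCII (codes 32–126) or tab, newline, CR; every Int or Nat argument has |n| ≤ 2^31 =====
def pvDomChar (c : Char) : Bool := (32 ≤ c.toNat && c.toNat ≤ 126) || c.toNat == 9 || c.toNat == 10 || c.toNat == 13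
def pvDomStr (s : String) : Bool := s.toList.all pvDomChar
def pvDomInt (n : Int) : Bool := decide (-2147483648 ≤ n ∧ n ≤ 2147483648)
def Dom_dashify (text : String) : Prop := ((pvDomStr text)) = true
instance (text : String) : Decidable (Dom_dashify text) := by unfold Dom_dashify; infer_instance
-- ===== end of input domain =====

-- B replaces A's accumulator loop with a per-character substitution (regex '[^a-z]') over the tail,
-- concatenated after the lowered first character; objective: more idiomatic, same result.


-- ===== PORT A =====
-- string.ascii_lowercase
def asciiLower : List Char := "abcdefghijklmnopqrstuvwxyz".toList

def dashify (text : String) : String :=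
  match PySem.List.pyGet? text.toList 0 with
  | none => ""      -- IndexError on empty text; excluded by Pre_dashify
  | some c0 =>
    String.ofList ((PySem.List.slice text.toList (some 1) none).foldl
      (fun acc c =>
        if asciiLower.contains c then acc ++ [c]
        else acc ++ ['-', PySem.Chars.lowerChar c])
      [PySem.Chars.lowerChar c0])

-- ===== PORT B =====
-- the regex '[^a-z]' matches exactly one char with c < 'a' or 'z' < c; the substitution emits '-' + c.lower()
def dashify_alt (text : String) : String :=
  match text.toList with
  | [] => ""        -- text[0] raises IndexError; excluded by Pre_dashify
  | c0 :: rest =>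
    String.ofList (PySem.Chars.lowerChar c0 ::
      rest.flatMap (fun c =>
        if 'a' ≤ c ∧ c ≤ 'z' then [c] else ['-', PySem.Chars.lowerChar c]))

-- ===== PRECONDITION & SPEC =====
-- Pre_ excludes only the empty string, on which A raises IndexError (text[0]).
def Pre_dashify (text : String) : Prop := text ≠ ""
instance (text : String) : Decidable (Pre_dashify text) := by unfold Pre_dashify; infer_instance
def pvWitness_dashify : String := "Ab c"

def Spec_dashify (text : String) (out : String) : Prop := out = dashify_alt text
instance (text : String) (out : String) : Decidable (Spec_dashify text out) := by unfold Spec_dashify; infer_instance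

-- ===== CLAIM (what is proved, stated in full; the proofs are below) =====
def Claim_equal_dashify : Prop := ∀ (text : String), Dom_dashify text → Pre_dashify text → Spec_dashify text (dashify text)

-- ===== LEMMAS AND PROOFS =====

-- A's membership test 'c in string.ascii_lowercase' is B's range test 'a' ≤ c ≤ 'z'
set_option maxRecDepth 4096 in
theorem contains_asciiLower (c : Char) :
    asciiLower.contains c = decide ('a' ≤ c ∧ c ≤ 'z') := by
  simp only [asciiLower, show "abcdefghijklmnopqrstuvwxyz".toList =
    ['a','b','c','d','e','f','g','h','i','j','k','l','m','n','o','p','q','r','s','t','u','v','w','x','y','z'] from rfl,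
    List.contains_cons, List.contains_nil, Bool.or_false]
  rw [Bool.eq_iff_iff]
  simp only [Bool.or_eq_true, beq_iff_eq, decide_eq_true_eq,
    Char.ext_iff, Char.le_def, UInt32.le_iff_toNat_le, UInt32.ext_iff,
    show 'a'.val.toNat = 97 from rfl, show 'b'.val.toNat = 98 from rfl, show 'c'.val.toNat = 99 from rfl,
    show 'd'.val.toNat = 100 from rfl, show 'e'.val.toNat = 101 from rfl, show 'f'.val.toNat = 102 from rfl,
    show 'g'.val.toNat = 103 from rfl, show 'h'.val.toNat = 104 from rfl, show 'i'.val.toNat = 105 from rfl,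
    show 'j'.val.toNat = 106 from rfl, show 'k'.val.toNat = 107 from rfl, show 'l'.val.toNat = 108 from rfl,
    show 'm'.val.toNat = 109 from rfl, show 'n'.val.toNat = 110 from rfl, show 'o'.val.toNat = 111 from rfl,
    show 'p'.val.toNat = 112 from rfl, show 'q'.val.toNat = 113 from rfl, show 'r'.val.toNat = 114 from rfl,
    show 's'.val.toNat = 115 from rfl, show 't'.val.toNat = 116 from rfl, show 'u'.val.toNat = 117 from rfl,
    show 'v'.val.toNat = 118 from rfl, show 'w'.val.toNat = 119 from rfl, show 'x'.val.toNat = 120 from rfl,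
    show 'y'.val.toNat = 121 from rfl, show 'z'.val.toNat = 122 from rfl]
  omega

-- ===== VERDICT (by name: the statement is the Claim_ definition above) =====
theorem dashify_spec : Claim_equal_dashify := by
  intro text _ hpre
  unfold Spec_dashify dashify dashify_alt
  cases h : text.toList with
  | nil =>
    exact absurd (by simpa using congrArg String.ofList h) hpre
  | cons c0 rest =>
    rw [PySem.List.pyGet?_zero_cons, PySem.List.slice_from_one]
    simp only [List.tail_cons]
    have hstep : rest.foldl
        (fun acc c => if asciiLower.contains c then acc ++ [c]
                      else acc ++ ['-', PySem.Chars.lowerChar c])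
        [PySem.Chars.lowerChar c0]
      = [PySem.Chars.lowerChar c0] ++ rest.flatMap
          (fun c => if 'a' ≤ c ∧ c ≤ 'z' then [c] else ['-', PySem.Chars.lowerChar c]) := by
      have hf : (fun acc c => if asciiLower.contains c then acc ++ [c]
                              else acc ++ ['-', PySem.Chars.lowerChar c])
          = (fun (acc : List Char) c =>
              acc ++ (if 'a' ≤ c ∧ c ≤ 'z' then [c] else ['-', PySem.Chars.lowerChar c])) := by
        funext acc c
        rw [contains_asciiLower c]
        by_cases hc : 'a' ≤ c ∧ c ≤ 'z' <;> simp [hc]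
      rw [hf, PySem.List.foldl_append_eq_flatMap]
    rw [hstep]
    rfl
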